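-- pv_equiv track=rewrite | github.com/minstradamuss/1-term-in-ITMO-university | discrete mathematics/laboratory work №2/G.py | intoBinary
-- ===== SOURCE A (Python) =====
-- def intoBinary(step, number, otv):
--     pred_pr = []
--     while step > 0:
--         ost = number % 2
--         number //= 2
--         pred_pr.append(ost)
--         step -= 1
--     if len(pred_pr) == 0:
--         otv.append(0)
--     else:
--         for i in range (len(pred_pr) - 1, -1, -1):
--             otv.append(pred_pr[i])
--     return otv
-- ===== SOURCE B (Python) =====
-- def intoBinary(step, number, otv):
--     if step <= 0:
--         otv.append(0)
--         return otv
--     for i in range(step - 1, -1, -1):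
--         otv.append((number >> i) & 1)
--     return otv
-- ===== Notes on version B (the rewrite author's own statement) =====
-- stated objective: simpler
-- what changed: B extracts each bit positionally ((number >> i) & 1) from high to low and appends it directly, removing A's temporary low-to-high list, its reversal loop and its mutation of step/number.
import Mathlib
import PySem

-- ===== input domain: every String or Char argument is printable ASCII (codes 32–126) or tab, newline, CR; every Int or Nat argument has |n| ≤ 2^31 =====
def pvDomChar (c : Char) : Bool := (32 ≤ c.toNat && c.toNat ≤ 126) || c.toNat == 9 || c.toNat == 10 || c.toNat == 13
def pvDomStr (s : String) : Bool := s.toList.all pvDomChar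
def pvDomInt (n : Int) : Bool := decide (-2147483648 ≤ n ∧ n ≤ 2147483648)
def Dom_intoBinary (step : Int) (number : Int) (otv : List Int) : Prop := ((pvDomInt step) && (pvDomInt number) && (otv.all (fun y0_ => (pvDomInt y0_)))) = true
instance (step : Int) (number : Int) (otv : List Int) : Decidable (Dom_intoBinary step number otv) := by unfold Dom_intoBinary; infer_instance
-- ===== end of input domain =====

-- B appends each bit positionally (number // 2**i % 2) from high to low, removing A's
-- temporary low-to-high list and its reversal loop (objective: simpler). Both A and B
-- mutate otv in place by appending; B performs the same mutation as A.


-- ===== PORT A =====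
-- the `while step > 0` loop of A: state (step, number, pred_pr)
def intoBinaryLoopA (step : Int) (number : Int) (pred_pr : List Int) : List Int :=
  if _h : step > 0 then
    intoBinaryLoopA (step - 1) (PySem.Int.floordiv number 2)
      (pred_pr ++ [PySem.Int.mod number 2])
  else pred_pr
termination_by step.toNat
decreasing_by omega

def intoBinary (step : Int) (number : Int) (otv : List Int) : List Int :=
  let pred_pr := intoBinaryLoopA step number []
  if pred_pr.length = 0 then otv ++ [0]
  else
    (PySem.List.pyRange ((pred_pr.length : Int) - 1) (-1) (-1)).foldl
      (fun acc i => acc ++ [PySem.List.pyGetD pred_pr i 0]) otv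

-- ===== PORT B =====
def intoBinary_alt (step : Int) (number : Int) (otv : List Int) : List Int :=
  if step ≤ 0 then otv ++ [0]
  else
    (PySem.List.pyRange (step - 1) (-1) (-1)).foldl
      (fun acc i => acc ++ [PySem.Int.band (number >>> i.toNat) 1]) otv

-- ===== PRECONDITION & SPEC =====
def Spec_intoBinary (step : Int) (number : Int) (otv : List Int) (out : List Int) : Prop := out = intoBinary_alt step number otv
instance (step : Int) (number : Int) (otv : List Int) (out : List Int) : Decidable (Spec_intoBinary step number otv out) := by unfold Spec_intoBinary; infer_instance

-- ===== CLAIM (what is proved, stated in full; the proofs are below) =====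
def Claim_equal_intoBinary : Prop := ∀ (step : Int) (number : Int) (otv : List Int), Dom_intoBinary step number otv → Spec_intoBinary step number otv (intoBinary step number otv)

-- ===== LEMMAS AND PROOFS =====

-- bit k of `number` (Python floor semantics), the value B appends at position k
def pvBit (number : Int) (k : Nat) : Int :=
  PySem.Int.mod (PySem.Int.floordiv number (2 ^ k)) 2

lemma pvBit_shift (number : Int) (k : Nat) :
    PySem.Int.band (number >>> (k : Int)) 1 = pvBit number k := by
  rw [Int.shiftRight_natCast_right, PySem.Int.band_one, Int.shiftRight_eq_div_pow]
  unfold pvBit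
  rw [PySem.Int.floordiv_eq_ediv_of_pos (by positivity)]
  push_cast
  rfl

lemma pvBit_succ (number : Int) (k : Nat) :
    pvBit number (k + 1) = pvBit (PySem.Int.floordiv number 2) k := by
  unfold pvBit
  rw [PySem.Int.floordiv_eq_ediv_of_pos (b := 2) (by omega),
      PySem.Int.floordiv_eq_ediv_of_pos (by positivity),
      PySem.Int.floordiv_eq_ediv_of_pos (by positivity),
      Int.ediv_ediv_of_nonneg (by omega)]
  ring_nf

lemma loopA_nonpos (step number : Int) (pred : List Int) (hs : ¬ step > 0) :
    intoBinaryLoopA step number pred = pred := by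
  rw [intoBinaryLoopA]; simp [hs]

lemma loopA_eq (n : Nat) : ∀ (number : Int) (pred : List Int),
    intoBinaryLoopA (n : Int) number pred =
      pred ++ (List.range n).map (pvBit number) := by
  induction n with
  | zero => intro number pred; rw [loopA_nonpos _ _ _ (by omega)]; simp
  | succ n ih =>
    intro number pred
    rw [intoBinaryLoopA]
    have h1 : ((n + 1 : Nat) : Int) > 0 := by omega
    have h2 : ((n + 1 : Nat) : Int) - 1 = (n : Int) := by omega
    simp only [h1, dite_true, h2, ih]
    rw [List.range_succ_eq_map]
    simp only [List.map_cons, List.map_map, List.append_assoc, List.singleton_append]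
    have hbit0 : pvBit number 0 = PySem.Int.mod number 2 := by
      unfold pvBit; simp [PySem.Int.floordiv]
    have hmap : (pvBit number ∘ Nat.succ) = pvBit (PySem.Int.floordiv number 2) :=
      funext fun k => by simp only [Function.comp_apply]; exact pvBit_succ number k
    rw [hbit0, hmap]

theorem intoBinary_eq_alt (step number : Int) (otv : List Int) :
    intoBinary step number otv = intoBinary_alt step number otv := by
  unfold intoBinary intoBinary_alt
  by_cases hstep : step ≤ 0
  · rw [loopA_nonpos _ _ _ (by omega)]
    simp [hstep]
  · have hn : step = (step.toNat : Int) := by omega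
    rw [hn, loopA_eq step.toNat number []]
    have hlen : ((List.range step.toNat).map (pvBit number)).length = step.toNat := by simp
    have hne : ¬ ((List.range step.toNat).map (pvBit number)).length = 0 := by
      simp [hlen]; omega
    simp only [List.nil_append, hlen, if_neg (by omega : ¬ (step.toNat : Int) ≤ 0)]
    rw [if_neg (show ¬ step.toNat = 0 by omega)]
    apply PySem.List.foldl_congr_mem
    intro acc i hi
    rw [PySem.List.mem_pyRange_neg_one] at hi
    have h0 : 0 ≤ i := by omega
    have hlt : i.toNat < step.toNat := by omega
    rw [PySem.List.pyGetD_eq_getElem _ 0 h0 (by simp only [hlen]; omega)]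
    rw [pvBit_shift]
    simp

-- ===== VERDICT (by name: the statement is the Claim_ definition above) =====
theorem intoBinary_spec : Claim_equal_intoBinary := by
  intro step number otv _
  unfold Spec_intoBinary
  exact intoBinary_eq_alt step number otv
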